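-- pv_equiv track=rewrite | github.com/TrellixVulnTeam/Uroflowmeter-App-BackUp-_NPW6 | MainApp/Adapter/PatientReportTest.py | VoidTypeInfo
-- ===== SOURCE A (Python) =====
-- def VoidTypeInfo(VoidType, VoidVolume):
--
--     #Count
--     NocturiaCount = 0
--     NormalCount = 0
--     MorningCount = 0
--
--     #Volumes
--     NocturiaVoidVol = []
--     NormalVoidVol = []
--     MorningVoidVol = []
--
--     for i in range(0, len(VoidType)):
--         if VoidType[i] == "First Morning Episode":
--             MorningVoidVol.append(VoidVolume[i])
--             MorningCount += 1
--         elif VoidType[i] == "Normal Episode":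
--             NormalVoidVol.append(VoidVolume[i])
--             NormalCount += 1
--         elif VoidType[i] == "Nocturia Episode":
--             NocturiaVoidVol.append(VoidVolume[i])
--             NocturiaCount += 1
--
--     return NocturiaCount, NormalCount, MorningCount, NocturiaVoidVol, NormalVoidVol, MorningVoidVol
-- ===== SOURCE B (Python) =====
-- def VoidTypeInfo(VoidType, VoidVolume):
--     NocturiaVoidVol = [VoidVolume[i] for i in range(len(VoidType)) if VoidType[i] == "Nocturia Episode"]
--     NormalVoidVol = [VoidVolume[i] for i in range(len(VoidType)) if VoidType[i] == "Normal Episode"]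
--     MorningVoidVol = [VoidVolume[i] for i in range(len(VoidType)) if VoidType[i] == "First Morning Episode"]
--     return (len(NocturiaVoidVol), len(NormalVoidVol), len(MorningVoidVol),
--             NocturiaVoidVol, NormalVoidVol, MorningVoidVol)
-- ===== Notes on version B (the rewrite author's own statement) =====
-- stated objective: simpler
-- what changed: Replaces the single stateful loop with six accumulators by three independent filtering comprehensions (one per episode type), deriving the counts as the lengths of the collected lists.
import Mathlib
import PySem

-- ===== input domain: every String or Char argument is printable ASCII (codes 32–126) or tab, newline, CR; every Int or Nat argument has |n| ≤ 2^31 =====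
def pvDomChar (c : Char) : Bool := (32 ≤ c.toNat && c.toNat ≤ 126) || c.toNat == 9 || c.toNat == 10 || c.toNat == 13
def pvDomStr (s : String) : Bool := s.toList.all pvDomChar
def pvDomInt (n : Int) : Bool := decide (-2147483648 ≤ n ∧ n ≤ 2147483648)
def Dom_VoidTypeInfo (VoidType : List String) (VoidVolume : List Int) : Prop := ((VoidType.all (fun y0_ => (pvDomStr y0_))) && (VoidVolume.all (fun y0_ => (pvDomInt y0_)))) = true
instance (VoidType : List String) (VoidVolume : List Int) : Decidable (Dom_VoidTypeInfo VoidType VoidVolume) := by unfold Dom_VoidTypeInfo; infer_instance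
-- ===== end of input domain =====

-- B replaces A's single stateful loop (six accumulators) by three independent
-- filtering scans, one per episode type, with the counts derived as lengths ("simpler").

-- ===== PORT A =====
-- One pass over range(len(VoidType)); pyGetD's default is only reached where
-- Python raises IndexError (excluded by Pre_).
def VoidTypeInfo (VoidType : List String) (VoidVolume : List Int) : Int × Int × Int × List Int × List Int × List Int :=
  (PySem.List.pyRange 0 (VoidType.length : Int) 1).foldl
    (fun st i =>
      if PySem.List.pyGetD VoidType i "" = "First Morning Episode" then
        (st.1, st.2.1, st.2.2.1 + 1, st.2.2.2.1, st.2.2.2.2.1, st.2.2.2.2.2 ++ [PySem.List.pyGetD VoidVolume i 0])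
      else if PySem.List.pyGetD VoidType i "" = "Normal Episode" then
        (st.1, st.2.1 + 1, st.2.2.1, st.2.2.2.1, st.2.2.2.2.1 ++ [PySem.List.pyGetD VoidVolume i 0], st.2.2.2.2.2)
      else if PySem.List.pyGetD VoidType i "" = "Nocturia Episode" then
        (st.1 + 1, st.2.1, st.2.2.1, st.2.2.2.1 ++ [PySem.List.pyGetD VoidVolume i 0], st.2.2.2.2.1, st.2.2.2.2.2)
      else st)
    (0, 0, 0, [], [], [])

-- ===== PORT B =====
-- [VoidVolume[i] for i in range(len(VoidType)) if VoidType[i] == t]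
def pvPickVol (t : String) (VoidType : List String) (VoidVolume : List Int) : List Int :=
  ((PySem.List.pyRange 0 (VoidType.length : Int) 1).filter
      (fun i => PySem.List.pyGetD VoidType i "" == t)).map
    (fun i => PySem.List.pyGetD VoidVolume i 0)

def VoidTypeInfo_alt (VoidType : List String) (VoidVolume : List Int) : Int × Int × Int × List Int × List Int × List Int :=
  let noc := pvPickVol "Nocturia Episode" VoidType VoidVolume
  let nor := pvPickVol "Normal Episode" VoidType VoidVolume
  let mor := pvPickVol "First Morning Episode" VoidType VoidVolume
  ((noc.length : Int), (nor.length : Int), (mor.length : Int), noc, nor, mor)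

-- ===== PRECONDITION & SPEC =====
-- Pre_ excludes exactly the inputs on which Python A raises IndexError:
-- an index whose VoidType entry is one of the three episode strings but lies
-- beyond the end of VoidVolume. (B raises there too.)
def Pre_VoidTypeInfo (VoidType : List String) (VoidVolume : List Int) : Prop :=
  ∀ i : Nat, i < VoidType.length →
    (VoidType.getD i "" = "First Morning Episode" ∨ VoidType.getD i "" = "Normal Episode" ∨
     VoidType.getD i "" = "Nocturia Episode") → i < VoidVolume.length
instance (VoidType : List String) (VoidVolume : List Int) : Decidable (Pre_VoidTypeInfo VoidType VoidVolume) := by unfold Pre_VoidTypeInfo; infer_instance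
def pvWitness_VoidTypeInfo : List String × List Int := (["Normal Episode", "skip", "Nocturia Episode"], [5, 6, 7])

def Spec_VoidTypeInfo (VoidType : List String) (VoidVolume : List Int) (out : Int × Int × Int × List Int × List Int × List Int) : Prop := out = VoidTypeInfo_alt VoidType VoidVolume
instance (VoidType : List String) (VoidVolume : List Int) (out : Int × Int × Int × List Int × List Int × List Int) : Decidable (Spec_VoidTypeInfo VoidType VoidVolume out) := by unfold Spec_VoidTypeInfo; infer_instance

-- ===== CLAIM (what is proved, stated in full; the proofs are below) =====
def Claim_equal_VoidTypeInfo : Prop := ∀ (VoidType : List String) (VoidVolume : List Int), Dom_VoidTypeInfo VoidType VoidVolume → Pre_VoidTypeInfo VoidType VoidVolume → Spec_VoidTypeInfo VoidType VoidVolume (VoidTypeInfo VoidType VoidVolume)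

-- ===== LEMMAS AND PROOFS =====
-- A's fold over the first n indices produces exactly B's three filtered lists
-- (over the same n indices) together with their lengths.
theorem pv_key (VoidType : List String) (VoidVolume : List Int) (n : Nat) :
    (PySem.List.pyRange 0 (n : Int) 1).foldl
      (fun st i =>
        if PySem.List.pyGetD VoidType i "" = "First Morning Episode" then
          (st.1, st.2.1, st.2.2.1 + 1, st.2.2.2.1, st.2.2.2.2.1, st.2.2.2.2.2 ++ [PySem.List.pyGetD VoidVolume i 0])
        else if PySem.List.pyGetD VoidType i "" = "Normal Episode" then
          (st.1, st.2.1 + 1, st.2.2.1, st.2.2.2.1, st.2.2.2.2.1 ++ [PySem.List.pyGetD VoidVolume i 0], st.2.2.2.2.2)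
        else if PySem.List.pyGetD VoidType i "" = "Nocturia Episode" then
          (st.1 + 1, st.2.1, st.2.2.1, st.2.2.2.1 ++ [PySem.List.pyGetD VoidVolume i 0], st.2.2.2.2.1, st.2.2.2.2.2)
        else st)
      (0, 0, 0, [], [], []) =
    (let pick := fun (t : String) =>
        ((PySem.List.pyRange 0 (n : Int) 1).filter
            (fun i => PySem.List.pyGetD VoidType i "" == t)).map
          (fun i => PySem.List.pyGetD VoidVolume i 0)
     (((pick "Nocturia Episode").length : Int), ((pick "Normal Episode").length : Int),
      ((pick "First Morning Episode").length : Int),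
      pick "Nocturia Episode", pick "Normal Episode", pick "First Morning Episode")) := by
  induction n with
  | zero => simp [PySem.List.pyRange_zero_nat]
  | succ n ih =>
    have hsplit : PySem.List.pyRange 0 ((n + 1 : Nat) : Int) 1
        = PySem.List.pyRange 0 (n : Int) 1 ++ [(n : Int)] := by
      push_cast
      exact PySem.List.pyRange_one_succ_right (by exact_mod_cast Nat.zero_le n)
    rw [hsplit, List.foldl_append, ih]
    simp only [List.filter_append, List.map_append, List.foldl_cons, List.foldl_nil,
      List.filter_cons, List.filter_nil, List.map_cons, List.map_nil,
      PySem.List.pyGetD_natCast, beq_iff_eq]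
    by_cases h1 : VoidType[n]?.getD "" = "First Morning Episode"
    · simp [h1, List.length_append]
    · by_cases h2 : VoidType[n]?.getD "" = "Normal Episode"
      · simp [h1, h2, List.length_append]
      · by_cases h3 : VoidType[n]?.getD "" = "Nocturia Episode"
        · simp [h1, h2, h3, List.length_append]
        · simp [h1, h2, h3]

-- ===== VERDICT (by name: the statement is the Claim_ definition above) =====
theorem VoidTypeInfo_spec : Claim_equal_VoidTypeInfo := by
  intro VoidType VoidVolume _ _
  unfold Spec_VoidTypeInfo VoidTypeInfo VoidTypeInfo_alt pvPickVol
  exact pv_key VoidType VoidVolume VoidType.length
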